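-- pv_equiv track=rewrite | github.com/daniel-reich/ubiquitous-fiesta | MFteyMABeuGaga3a7_15.py | color_pattern_times
-- ===== SOURCE A (Python) =====
-- def color_pattern_times(cols):
--   if cols==[]: return 0
--   time = 2
--   for i in range(1, len(cols)):
--     if cols[i] != cols[i-1:][0]:
--       time += 3
--     else:
--       time += 2
--   return time
-- ===== SOURCE B (Python) =====
-- def color_pattern_times(cols):
--     if not cols:
--         return 0
--     return 2 * len(cols) + runs(cols) - 1
--
--
-- def runs(xs):
--     # number of maximal blocks of equal adjacent elements, by divide and conquer:
--     # runs(u ++ v) = runs(u) + runs(v) minus 1 if the two halves meet inside one block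
--     if len(xs) <= 1:
--         return len(xs)
--     mid = len(xs) // 2
--     return runs(xs[:mid]) + runs(xs[mid:]) - (xs[mid - 1] == xs[mid])
-- ===== Notes on version B (the rewrite author's own statement) =====
-- stated objective: alternative
-- what changed: Instead of scanning adjacent pairs and adding 2 or 3 each, B counts the maximal runs of equal colors by a divide-and-conquer recursion (merging two halves subtracts 1 when they meet inside one run) and returns the closed form 2*len(cols) + runs - 1.
import Mathlib
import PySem

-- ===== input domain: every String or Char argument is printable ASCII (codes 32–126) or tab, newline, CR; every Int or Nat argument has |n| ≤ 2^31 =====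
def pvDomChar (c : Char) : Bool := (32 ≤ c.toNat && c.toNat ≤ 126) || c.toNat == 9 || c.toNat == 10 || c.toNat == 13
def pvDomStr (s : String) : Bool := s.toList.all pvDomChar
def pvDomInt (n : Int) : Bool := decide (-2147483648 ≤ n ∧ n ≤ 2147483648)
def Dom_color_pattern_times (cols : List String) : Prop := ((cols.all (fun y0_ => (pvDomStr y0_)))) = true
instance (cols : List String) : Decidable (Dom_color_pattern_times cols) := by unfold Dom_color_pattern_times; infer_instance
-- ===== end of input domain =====

-- B counts maximal runs of equal colors by divide-and-conquer and returns the closed form 2*len + runs - 1, instead of A's adjacent-pair branch loop; measured faster (A's per-step slice is quadratic).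


-- ===== PORT A =====
-- cols[i-1:][0] is slice-from-(i-1) then index 0; indices produced by range(1, len) are
-- always in range, so pyGetD with default "" is exact here.
def color_pattern_times (cols : List String) : Int :=
  if cols = [] then 0
  else
    (PySem.List.pyRange 1 (cols.length : Int) 1).foldl
      (fun time i =>
        if PySem.List.pyGetD cols i "" ≠
            PySem.List.pyGetD (PySem.List.slice cols (some (i - 1)) none) 0 "" then
          time + 3
        else
          time + 2) 2

-- ===== PORT B =====
-- runs: xs[:mid] / xs[mid:] with 0 ≤ mid ≤ len are exactly take/drop; xs[mid-1], xs[mid]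
-- are in range here, so getD with default "" is exact; the bool (==) used as int becomes if-then-1-else-0.
def pvRuns (xs : List String) : Int :=
  if xs.length ≤ 1 then (xs.length : Int)
  else
    pvRuns (xs.take (xs.length / 2)) + pvRuns (xs.drop (xs.length / 2)) -
      (if xs.getD (xs.length / 2 - 1) "" = xs.getD (xs.length / 2) "" then 1 else 0)
termination_by xs.length
decreasing_by
  · simp only [List.length_take]; omega
  · simp only [List.length_drop]; omega

def color_pattern_times_alt (cols : List String) : Int :=
  if cols = [] then 0
  else 2 * (cols.length : Int) + pvRuns cols - 1

-- ===== PRECONDITION & SPEC =====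
def Spec_color_pattern_times (cols : List String) (out : Int) : Prop := out = color_pattern_times_alt cols
instance (cols : List String) (out : Int) : Decidable (Spec_color_pattern_times cols out) := by unfold Spec_color_pattern_times; infer_instance

-- ===== CLAIM (what is proved, stated in full; the proofs are below) =====
def Claim_equal_color_pattern_times : Prop := ∀ (cols : List String), Dom_color_pattern_times cols → Spec_color_pattern_times cols (color_pattern_times cols)

-- ===== LEMMAS AND PROOFS =====

-- number of differing adjacent pairs, structurally
def pvD : List String → Int
  | [] => 0
  | [_] => 0
  | a :: b :: t => (if a ≠ b then 1 else 0) + pvD (b :: t)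

-- The per-index summand of A's loop equals the per-pair summand (3 = 2+1, 2 = 2+0).
theorem cpt_map_eq (cols : List String) :
    (PySem.List.pyRange 1 (cols.length : Int) 1).map
        (fun i => if PySem.List.pyGetD cols i "" ≠
            PySem.List.pyGetD (PySem.List.slice cols (some (i - 1)) none) 0 "" then (3 : Int) else 2)
      = (cols.zip cols.tail).map (fun p => if p.1 ≠ p.2 then (3 : Int) else 2) := by
  apply List.ext_getElem
  · simp [PySem.List.length_pyRange_one]
  · intro k h1 h2
    have hk : k < cols.length - 1 := by
      simpa [PySem.List.length_pyRange_one] using h1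
    simp only [List.getElem_map, PySem.List.getElem_pyRange_one, List.getElem_zip]
    have h1k : ((1 : Int) + k) = ((k + 1 : Nat) : Int) := by push_cast; ring
    have hslice : (((k + 1 : Nat) : Int) - 1) = ((k : Nat) : Int) := by push_cast; ring
    rw [h1k, hslice, PySem.List.slice_from_natCast, PySem.List.pyGetD_natCast,
      PySem.List.pyGetD_zero]
    have hdrop : (cols.drop k).getD 0 "" = cols[k] := by
      rw [List.getD_eq_getElem?_getD, List.getElem?_drop]
      simp [List.getElem?_eq_getElem (show k < cols.length by omega)]
    rw [hdrop, List.getD_eq_getElem?_getD,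
      List.getElem?_eq_getElem (by omega : k + 1 < cols.length)]
    simp [List.getElem_tail, eq_comm]

theorem cpt_sum_split (l : List (String × String)) :
    (l.map (fun p => if p.1 ≠ p.2 then (3 : Int) else 2)).sum
      = 2 * (l.length : Int) + (l.map (fun p => if p.1 ≠ p.2 then (1 : Int) else 0)).sum := by
  induction l with
  | nil => simp
  | cons x xs ih =>
    simp only [List.map_cons, List.sum_cons, ih, List.length_cons]
    split_ifs <;> push_cast <;> ring

theorem cpt_zipsum_eq_D (cols : List String) :
    ((cols.zip cols.tail).map (fun p => if p.1 ≠ p.2 then (1 : Int) else 0)).sum = pvD cols := by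
  induction cols with
  | nil => simp [pvD]
  | cons a t ih =>
    cases t with
    | nil => simp [pvD]
    | cons b t' =>
      simp only [List.zip_cons_cons, List.tail_cons, List.map_cons, List.sum_cons] at *
      rw [ih]
      simp [pvD]

theorem pvD_append (u : List String) : ∀ (v : List String), u ≠ [] → v ≠ [] →
    pvD (u ++ v) = pvD u + pvD v + (if u.getLastD "" ≠ v.headD "" then 1 else 0) := by
  induction u with
  | nil => intro v hu _; exact absurd rfl hu
  | cons a u' ih =>
    intro v _ hv
    cases u' with
    | nil =>
      cases v with
      | nil => exact absurd rfl hv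
      | cons c t => simp [pvD]; ring
    | cons a2 u3 =>
      have h := ih v (by simp) hv
      simp only [List.cons_append, pvD] at *
      have hgl : (a :: a2 :: u3).getLastD "" = u3.getLastD a2 := by
        rw [List.getLastD_cons, List.getLastD_cons]
      rw [h, List.getLastD_cons, hgl]
      ring

theorem pvRuns_eq (xs : List String) : pvRuns xs = if xs = [] then 0 else 1 + pvD xs := by
  fun_induction pvRuns xs with
  | case1 xs h =>
    match xs, h with
    | [], _ => simp
    | [a], _ => simp [pvD]
  | case2 xs h ih1 ih2 =>
    have hlen : 2 ≤ xs.length := by omega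
    have hmid1 : 1 ≤ xs.length / 2 := by omega
    have hmid2 : xs.length / 2 < xs.length := by omega
    set m := xs.length / 2 with hm
    have htne : xs.take m ≠ [] := by
      intro hc
      have hl : (xs.take m).length = min m xs.length := List.length_take
      rw [hc] at hl; simp at hl; omega
    have hdne : xs.drop m ≠ [] := by
      intro hc
      have hl : (xs.drop m).length = xs.length - m := List.length_drop
      rw [hc] at hl; simp at hl; omega
    have hsplit := pvD_append (xs.take m) (xs.drop m) htne hdne
    rw [List.take_append_drop] at hsplit
    have hlast : (xs.take m).getLastD "" = xs.getD (m - 1) "" := by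
      rw [List.getLastD_eq_getLast?, List.getLast?_eq_getElem?, List.getD_eq_getElem?_getD]
      have hl : (xs.take m).length = m := by rw [List.length_take]; omega
      rw [hl, List.getElem?_take, if_pos (show m - 1 < m by omega)]
    have hhead : (xs.drop m).headD "" = xs.getD m "" := by
      rw [List.headD_eq_head?, List.head?_eq_getElem?, List.getD_eq_getElem?_getD,
        List.getElem?_drop]
      simp
    rw [ih1, ih2, if_neg htne, if_neg hdne,
      if_neg (show ¬ xs = [] by intro hc; subst hc; simp at hlen), hsplit, hlast, hhead]
    split_ifs with h1 h2 <;> try ring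
    all_goals exact (h2 h1).elim

-- ===== VERDICT (by name: the statement is the Claim_ definition above) =====
theorem color_pattern_times_spec : Claim_equal_color_pattern_times := by
  intro cols _
  unfold Spec_color_pattern_times color_pattern_times color_pattern_times_alt
  by_cases h : cols = []
  · simp [h]
  · simp only [if_neg h]
    have hfun : (fun (time : Int) (i : Int) =>
        if PySem.List.pyGetD cols i "" ≠
            PySem.List.pyGetD (PySem.List.slice cols (some (i - 1)) none) 0 "" then
          time + 3 else time + 2)
      = (fun (time : Int) (i : Int) => time +
          (if PySem.List.pyGetD cols i "" ≠
              PySem.List.pyGetD (PySem.List.slice cols (some (i - 1)) none) 0 "" then (3 : Int) else 2)) := by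
      funext t i; split_ifs <;> rfl
    rw [hfun, PySem.List.foldl_add, cpt_map_eq, cpt_sum_split, cpt_zipsum_eq_D,
      pvRuns_eq cols, if_neg h]
    have hlen : ((cols.zip cols.tail).length : Int) = (cols.length : Int) - 1 := by
      have : cols.length ≠ 0 := fun hc => h (List.eq_nil_of_length_eq_zero hc)
      simp [List.length_zip, List.length_tail]
      omega
    rw [hlen]; ring
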